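-- pv_equiv track=rewrite | github.com/dism-exe/bn6f | tools/bn_textscript_dumper/text_script_dumper.py | bn6f_str
-- ===== SOURCE A (Python) =====
-- def bn6f_str(byte_arr, tbl):
--     out = ''
--     skip_next = False
--     for i, byte in enumerate(byte_arr):
--         if skip_next:
--             skip_next = False
--             continue
--         if byte == 0xE4:
--             short = (byte << 8) + byte_arr[i+1]
--             out = out + tbl[short]
--             skip_next = True
--         elif tbl[byte] == '"':
--             out = out + '\\"'
--         else:
--             out = out + tbl[byte]
--     return out
-- ===== SOURCE B (Python) =====
-- def bn6f_str(byte_arr, tbl):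
--     # Stage 1: tokenize the raw stream into (code, is_wide) tokens; a 0xE4
--     # byte merges with its successor into a 16-bit code.
--     tokens = []
--     i = 0
--     while i < len(byte_arr):
--         b = byte_arr[i]
--         if b == 0xE4:
--             tokens.append(((b << 8) + byte_arr[i + 1], True))
--             i += 2
--         else:
--             tokens.append((b, False))
--             i += 1
--     # Stage 2: render each token through the table (quote-escaping only
--     # single-byte tokens, as the format demands) and join once.
--     return ''.join('\\"' if not wide and tbl[c] == '"' else tbl[c]
--                    for c, wide in tokens)
-- ===== Notes on version B (the rewrite author's own statement) =====
-- stated objective: alternative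
-- what changed: Replaces A's single fused pass (enumerate loop with a skip_next flag and repeated string concatenation) by a staged pipeline: a tokenizer pass that builds an explicit intermediate list of (code, is_wide) tokens, then a separate rendering pass mapping tokens through the table and joining once.
import Mathlib
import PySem

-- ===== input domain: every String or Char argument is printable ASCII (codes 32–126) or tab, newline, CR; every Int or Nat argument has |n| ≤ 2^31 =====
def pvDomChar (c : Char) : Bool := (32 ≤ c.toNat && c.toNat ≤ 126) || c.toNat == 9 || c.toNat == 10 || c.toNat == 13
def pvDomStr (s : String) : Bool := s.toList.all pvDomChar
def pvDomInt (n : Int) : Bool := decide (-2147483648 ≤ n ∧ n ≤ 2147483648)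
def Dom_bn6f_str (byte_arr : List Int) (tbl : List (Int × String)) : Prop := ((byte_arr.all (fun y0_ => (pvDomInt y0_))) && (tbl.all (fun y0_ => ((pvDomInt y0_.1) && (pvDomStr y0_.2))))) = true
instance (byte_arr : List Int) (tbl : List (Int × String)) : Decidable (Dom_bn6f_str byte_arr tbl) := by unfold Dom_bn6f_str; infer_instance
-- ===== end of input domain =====

-- B replaces A's fused enumerate loop with skip_next flag and repeated concatenation by a
-- staged pipeline: tokenize into an explicit (code, is_wide) token list, then render+join.

-- ===== PORT A =====
-- A's for-loop over enumerate(byte_arr) with the skip_next flag, as a structural recursion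
-- over the enumerated list with state (out, skip_next).  Where Python raises (IndexError on
-- byte_arr[i+1], KeyError on a missing table key) the PySem primitives return none and the
-- port substitutes a default (0 / ""): exactly those inputs are excluded by Pre_bn6f_str.
def bn6f_strGoA (byte_arr : List Int) (tbl : List (Int × String)) :
    List (Int × Int) → String → Bool → String
  | [], out, _ => out
  | (i, byte) :: rest, out, skip =>
    if skip then bn6f_strGoA byte_arr tbl rest out false
    else if byte = 0xE4 then
      bn6f_strGoA byte_arr tbl rest
        (out ++ (((PySem.Dict.mk tbl).get?
            ((byte <<< 8) + (PySem.List.pyGet? byte_arr (i + 1)).getD 0)).getD ""))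
        true
    else if ((PySem.Dict.mk tbl).get? byte).getD "" = "\"" then
      bn6f_strGoA byte_arr tbl rest (out ++ "\\\"") false
    else
      bn6f_strGoA byte_arr tbl rest (out ++ (((PySem.Dict.mk tbl).get? byte).getD "")) false

def bn6f_str (byte_arr : List Int) (tbl : List (Int × String)) : String :=
  bn6f_strGoA byte_arr tbl (PySem.List.enumerate byte_arr) "" false

-- ===== PORT B =====
-- B stage 1: the index-driven while loop tokenizing the stream, as recursion on the
-- not-yet-consumed suffix (i ↦ byte_arr.drop i); byte_arr[i+1] is the suffix's second
-- element.  Where Python raises (IndexError / KeyError) the port substitutes a default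
-- (0 / ""), as in port A; those inputs are excluded by Pre_bn6f_str.
def bn6f_strTok : List Int → List (Int × Bool)
  | [] => []
  | b :: r =>
    if b = 0xE4 then
      ((b <<< 8) + (PySem.List.pyGet? r 0).getD 0, true) :: bn6f_strTok r.tail
    else
      (b, false) :: bn6f_strTok r
termination_by l => l.length
decreasing_by
  all_goals simp [List.length_tail]

-- B stage 2: render one (code, is_wide) token through the table.
def bn6f_strRender (tbl : List (Int × String)) (t : Int × Bool) : String :=
  if t.2 = false ∧ ((PySem.Dict.mk tbl).get? t.1).getD "" = "\"" then "\\\""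
  else ((PySem.Dict.mk tbl).get? t.1).getD ""

def bn6f_str_alt (byte_arr : List Int) (tbl : List (Int × String)) : String :=
  PySem.Str.join "" ((bn6f_strTok byte_arr).map (bn6f_strRender tbl))

-- ===== PRECONDITION & SPEC =====
-- Pre_: byte_arr is a well-formed token stream for tbl.  A position i is DECODED exactly when
-- the run of consecutive 0xE4 bytes immediately before it has even length (each decoded 0xE4
-- consumes its successor).  At every decoded position: a 0xE4 must have a successor and the
-- short (0xE4<<8)+successor must be a key of tbl; any other byte must itself be a key.
-- On exactly the remaining inputs Python A raises (IndexError or KeyError); so does B.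
def Pre_bn6f_str (byte_arr : List Int) (tbl : List (Int × String)) : Prop :=
  ∀ i < byte_arr.length,
    ((byte_arr.take i).reverse.takeWhile (fun b => b == 228)).length % 2 = 0 →
      (byte_arr.getD i 0 = 228 →
        i + 1 < byte_arr.length ∧
          (PySem.Dict.mk tbl).contains (228 * 256 + byte_arr.getD (i + 1) 0) = true) ∧
      (byte_arr.getD i 0 ≠ 228 →
        (PySem.Dict.mk tbl).contains (byte_arr.getD i 0) = true)
instance (byte_arr : List Int) (tbl : List (Int × String)) : Decidable (Pre_bn6f_str byte_arr tbl) := by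
  unfold Pre_bn6f_str; infer_instance

def pvWitness_bn6f_str : List Int × (List (Int × String)) :=
  ([1, 0xE4, 7, 2], [(1, "H"), (2, "\""), (0xE407, "i")])

def Spec_bn6f_str (byte_arr : List Int) (tbl : List (Int × String)) (out : String) : Prop := out = bn6f_str_alt byte_arr tbl
instance (byte_arr : List Int) (tbl : List (Int × String)) (out : String) : Decidable (Spec_bn6f_str byte_arr tbl out) := by unfold Spec_bn6f_str; infer_instance

-- ===== CLAIM (what is proved, stated in full; the proofs are below) =====
def Claim_equal_bn6f_str : Prop := ∀ (byte_arr : List Int) (tbl : List (Int × String)), Dom_bn6f_str byte_arr tbl → Pre_bn6f_str byte_arr tbl → Spec_bn6f_str byte_arr tbl (bn6f_str byte_arr tbl)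

-- ===== LEMMAS AND PROOFS =====

theorem join_empty_cons (x : String) (l : List String) :
    PySem.Str.join "" (x :: l) = x ++ PySem.Str.join "" l := by
  cases l with
  | nil => simp [PySem.Str.join, PySem.Chars.join_singleton, PySem.Chars.join_nil]
  | cons y ys => simp [PySem.Str.join, PySem.Chars.join_cons_cons]

theorem join_empty_nil : PySem.Str.join "" ([] : List String) = "" := rfl

theorem goA_skip (byte_arr : List Int) (tbl : List (Int × String)) (r : List Int) (m : Int) (out : String) :
    bn6f_strGoA byte_arr tbl (PySem.List.enumerate r m) out true
      = bn6f_strGoA byte_arr tbl (PySem.List.enumerate r.tail (m + 1)) out false := by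
  cases r with
  | nil => simp [PySem.List.enumerate_nil, bn6f_strGoA]
  | cons x r' => simp [PySem.List.enumerate_cons, bn6f_strGoA]

theorem goA_eq_tok (byte_arr : List Int) (tbl : List (Int × String)) :
    ∀ (n : Nat) (out : String),
      bn6f_strGoA byte_arr tbl (PySem.List.enumerate (byte_arr.drop n) (n : Int)) out false
        = out ++ PySem.Str.join "" ((bn6f_strTok (byte_arr.drop n)).map (bn6f_strRender tbl)) := by
  have key : ∀ (k n : Nat) (out : String), byte_arr.length - n ≤ k →
      bn6f_strGoA byte_arr tbl (PySem.List.enumerate (byte_arr.drop n) (n : Int)) out false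
        = out ++ PySem.Str.join "" ((bn6f_strTok (byte_arr.drop n)).map (bn6f_strRender tbl)) := by
    intro k
    induction k with
    | zero =>
      intro n out h
      have hnil : byte_arr.drop n = [] := List.drop_eq_nil_of_le (by omega)
      simp only [hnil, PySem.List.enumerate_nil, bn6f_strGoA, bn6f_strTok, List.map_nil,
        join_empty_nil, String.append_empty]
    | succ k ih =>
      intro n out h
      cases hsuf : byte_arr.drop n with
      | nil =>
        simp only [PySem.List.enumerate_nil, bn6f_strGoA, bn6f_strTok, List.map_nil,
          join_empty_nil, String.append_empty]
      | cons b r =>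
        have hlen : byte_arr.length - n = r.length + 1 := by
          have hl := List.length_drop (i := n) (l := byte_arr)
          rw [hsuf] at hl; simp at hl; omega
        have hr1 : byte_arr.drop (n + 1) = r := by
          rw [← List.tail_drop, hsuf]; rfl
        rw [PySem.List.enumerate_cons]
        by_cases hb : b = (0xE4 : Int)
        · -- wide-token branch
          have hr2 : byte_arr.drop (n + 2) = r.tail := by
            rw [← List.tail_drop, hr1]
          have hget : PySem.List.pyGet? byte_arr ((n : Int) + 1) = r.head? := by
            rw [← hr1, List.head?_drop,
              show ((n : Int) + 1) = ((n + 1 : Nat) : Int) by push_cast; ring]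
            exact PySem.List.pyGet?_natCast byte_arr (n + 1)
          have hget0 : PySem.List.pyGet? r (0 : Int) = r.head? := by
            rw [show (0 : Int) = ((0 : Nat) : Int) from rfl]
            rw [PySem.List.pyGet?_natCast r 0]
            exact List.head?_eq_getElem?.symm
          simp only [bn6f_strGoA, hb, reduceIte, Bool.false_eq_true]
          rw [goA_skip,
            show ((n : Int) + 1 + 1) = ((n + 2 : Nat) : Int) by push_cast; ring,
            ← hr2, ih (n + 2) _ (by omega), hr2]
          simp only [bn6f_strTok, reduceIte, List.map_cons, bn6f_strRender]
          rw [join_empty_cons, ← String.append_assoc, hget, hget0]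
          simp
        · -- single-byte branch
          have hcast : ((n : Int) + 1) = ((n + 1 : Nat) : Int) := by push_cast; ring
          simp only [bn6f_strGoA, hb, Bool.false_eq_true, reduceIte]
          by_cases hq : ((PySem.Dict.mk tbl).get? b).getD "" = "\""
          · simp only [hq, reduceIte]
            rw [hcast, ← hr1, ih (n + 1) _ (by omega), hr1]
            simp only [bn6f_strTok, hb, reduceIte, List.map_cons, bn6f_strRender, hq]
            simp only [and_true, reduceIte]
            rw [join_empty_cons, ← String.append_assoc]
          · simp only [hq, reduceIte]
            rw [hcast, ← hr1, ih (n + 1) _ (by omega), hr1]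
            simp only [bn6f_strTok, hb, reduceIte, List.map_cons, bn6f_strRender, hq]
            simp only [and_false, reduceIte]
            rw [join_empty_cons, ← String.append_assoc]
  intro n out
  exact key (byte_arr.length - n) n out (le_refl _)

-- ===== VERDICT (by name: the statement is the Claim_ definition above) =====
theorem bn6f_str_spec : Claim_equal_bn6f_str := by
  intro byte_arr tbl _ _
  unfold Spec_bn6f_str bn6f_str bn6f_str_alt
  have h := goA_eq_tok byte_arr tbl 0 ""
  simpa [PySem.List.enumerate] using h
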